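-- pv_equiv track=rewrite | github.com/Mike-50505/AG_mejorado | Proyectofinal1.py | reproyectar_gaps_por_estructura
-- ===== SOURCE A (Python) =====
-- def reproyectar_gaps_por_estructura(secuencia_con_gaps, estructura_ref):
--     seq_aa = [a for a in secuencia_con_gaps if a != '-']
--     resultado = []
--     idx = 0
--     for is_gap in estructura_ref:
--         if is_gap:
--             resultado.append('-')
--         else:
--             if idx < len(seq_aa):
--                 resultado.append(seq_aa[idx])
--                 idx += 1
--             else:
--                 resultado.append('-')
--     # si quedan aa extras, intentar colocarlas en posiciones no-gap
--     if idx < len(seq_aa):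
--         for i in range(len(resultado)):
--             if resultado[i] == '-' and idx < len(seq_aa):
--                 resultado[i] = seq_aa[idx]
--                 idx += 1
--     return resultado
-- ===== SOURCE B (Python) =====
-- def reproyectar_gaps_por_estructura(secuencia_con_gaps, estructura_ref):
--     seq_aa = [a for a in secuencia_con_gaps if a != '-']
--     # priority index table: first the non-gap positions, then the gap positions
--     orden = [i for i, g in enumerate(estructura_ref) if not g] \
--           + [i for i, g in enumerate(estructura_ref) if g]
--     resultado = ['-'] * len(estructura_ref)
--     for k in range(min(len(seq_aa), len(orden))):
--         resultado[orden[k]] = seq_aa[k]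
--     return resultado
-- ===== Notes on version B (the rewrite author's own statement) =====
-- stated objective: alternative
-- what changed: A's two passes (fill non-gap slots while walking the template, then a second in-place cleanup scan that drops surplus residues into remaining '-' cells) are replaced by a precomputed priority index table (non-gap positions first, then gap positions) and one capped assignment loop over a '-'-initialized result.
import Mathlib
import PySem

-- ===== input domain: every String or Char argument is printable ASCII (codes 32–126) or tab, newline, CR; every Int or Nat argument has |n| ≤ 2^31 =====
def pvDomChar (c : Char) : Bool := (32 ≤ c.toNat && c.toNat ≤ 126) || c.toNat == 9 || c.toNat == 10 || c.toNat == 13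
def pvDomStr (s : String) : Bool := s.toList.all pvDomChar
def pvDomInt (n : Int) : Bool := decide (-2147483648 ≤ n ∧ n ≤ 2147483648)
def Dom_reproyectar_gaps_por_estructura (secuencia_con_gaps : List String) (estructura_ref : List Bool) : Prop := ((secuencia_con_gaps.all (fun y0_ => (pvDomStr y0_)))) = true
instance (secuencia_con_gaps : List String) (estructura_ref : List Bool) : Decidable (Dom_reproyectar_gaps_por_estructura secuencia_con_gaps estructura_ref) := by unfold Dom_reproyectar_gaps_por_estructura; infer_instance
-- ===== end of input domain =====

-- B replaces A's two passes (fill non-gaps, then a cleanup pass over resultado for surplus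
-- residues) by one priority-ordered assignment over a precomputed index table (objective:
-- alternative decomposition, same cost).

-- ===== PORT A =====
def reproyectar_gaps_por_estructura (secuencia_con_gaps : List String) (estructura_ref : List Bool) : List String :=
  let seq_aa := secuencia_con_gaps.filter (fun a => a ≠ "-")
  let p := estructura_ref.foldl (fun (st : List String × Nat) is_gap =>
      if is_gap then (st.1 ++ ["-"], st.2)
      else if st.2 < seq_aa.length then (st.1 ++ [seq_aa.getD st.2 "-"], st.2 + 1)
      else (st.1 ++ ["-"], st.2)) ([], 0)
  -- si quedan aa extras: second in-place pass over range(len(resultado))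
  if p.2 < seq_aa.length then
    ((List.range p.1.length).foldl (fun (st : List String × Nat) i =>
      if st.1.getD i "" = "-" ∧ st.2 < seq_aa.length then (st.1.set i (seq_aa.getD st.2 "-"), st.2 + 1)
      else st) p).1
  else p.1

-- ===== PORT B =====
def reproyectar_gaps_por_estructura_alt (secuencia_con_gaps : List String) (estructura_ref : List Bool) : List String :=
  let seq_aa := secuencia_con_gaps.filter (fun a => a ≠ "-")
  let orden : List Int :=
    ((PySem.List.enumerate estructura_ref).filter (fun p => !p.2)).map Prod.fst
    ++ ((PySem.List.enumerate estructura_ref).filter (fun p => p.2)).map Prod.fst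
  -- resultado[orden[k]] = seq_aa[k]: orden entries are nonnegative in-range indices, so .toNat is exact
  (List.range (min seq_aa.length orden.length)).foldl
    (fun r k => r.set (orden.getD k 0).toNat (seq_aa.getD k "-"))
    (List.replicate estructura_ref.length "-")

-- ===== PRECONDITION & SPEC =====
def Spec_reproyectar_gaps_por_estructura (secuencia_con_gaps : List String) (estructura_ref : List Bool) (out : List String) : Prop := out = reproyectar_gaps_por_estructura_alt secuencia_con_gaps estructura_ref
instance (secuencia_con_gaps : List String) (estructura_ref : List Bool) (out : List String) : Decidable (Spec_reproyectar_gaps_por_estructura secuencia_con_gaps estructura_ref out) := by unfold Spec_reproyectar_gaps_por_estructura; infer_instance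

-- ===== CLAIM (what is proved, stated in full; the proofs are below) =====
def Claim_equal_reproyectar_gaps_por_estructura : Prop := ∀ (secuencia_con_gaps : List String) (estructura_ref : List Bool), Dom_reproyectar_gaps_por_estructura secuencia_con_gaps estructura_ref → Spec_reproyectar_gaps_por_estructura secuencia_con_gaps estructura_ref (reproyectar_gaps_por_estructura secuencia_con_gaps estructura_ref)

-- ===== LEMMAS AND PROOFS =====

-- two-stream model: non-gap positions consume xs, gap positions consume ys, "-" when exhausted
def sp2 : List Bool → List String → List String → List String
  | [], _, _ => []
  | true :: gs, xs, ys => ys.headD "-" :: sp2 gs xs ys.tail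
  | false :: gs, xs, ys => xs.headD "-" :: sp2 gs xs.tail ys

-- structural form of A's first loop (result list, final idx)
def pairP (s : List String) : List Bool → Nat → List String × Nat
  | [], idx => ([], idx)
  | g :: gs, idx =>
    if g then ("-" :: (pairP s gs idx).1, (pairP s gs idx).2)
    else if idx < s.length then (s.getD idx "-" :: (pairP s gs (idx+1)).1, (pairP s gs (idx+1)).2)
    else ("-" :: (pairP s gs idx).1, (pairP s gs idx).2)

-- structural form of A's second (cleanup) loop
def fillF (s : List String) : List String → Nat → List String
  | [], _ => []
  | c :: cs, j => if c = "-" ∧ j < s.length then s.getD j "-" :: fillF s cs (j+1) else c :: fillF s cs j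

-- indices of non-gap / gap positions
def nIdx : List Bool → List Nat
  | [] => []
  | g :: gs => (if g then [] else [0]) ++ (nIdx gs).map (· + 1)

def gIdx : List Bool → List Nat
  | [] => []
  | g :: gs => (if g then [0] else []) ++ (gIdx gs).map (· + 1)

-- sequential writes
def wr (r : List String) (L : List (Nat × String)) : List String :=
  L.foldl (fun r pv => r.set pv.1 pv.2) r

theorem pairP_fold (s : List String) (er : List Bool) : ∀ (acc : List String) (idx : Nat),
    er.foldl (fun (st : List String × Nat) is_gap =>
      if is_gap then (st.1 ++ ["-"], st.2)
      else if st.2 < s.length then (st.1 ++ [s.getD st.2 "-"], st.2 + 1)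
      else (st.1 ++ ["-"], st.2)) (acc, idx)
    = (acc ++ (pairP s er idx).1, (pairP s er idx).2) := by
  intro acc idx
  induction er generalizing acc idx with
  | nil => simp [pairP]
  | cons g gs ih =>
    rw [List.foldl_cons]
    cases g with
    | false =>
      simp only [Bool.false_eq_true, if_false]
      split_ifs with h
      · rw [ih]; simp [pairP, h]
      · rw [ih]; simp [pairP, h]
    | true =>
      simp only [if_true]
      rw [ih]; simp [pairP]

theorem pairP_snd (s : List String) (er : List Bool) : ∀ idx : Nat, idx ≤ s.length →
    (pairP s er idx).2 = min (idx + (nIdx er).length) s.length := by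
  induction er with
  | nil => intro idx h; simp [pairP, nIdx]; omega
  | cons g gs ih =>
    intro idx h
    cases g with
    | false =>
      by_cases hi : idx < s.length
      · rw [show pairP s (false :: gs) idx = (s.getD idx "-" :: (pairP s gs (idx+1)).1, (pairP s gs (idx+1)).2) by simp [pairP, hi]]
        have := ih (idx+1) (by omega)
        simp [nIdx] at *
        omega
      · rw [show pairP s (false :: gs) idx = ("-" :: (pairP s gs idx).1, (pairP s gs idx).2) by simp [pairP, hi]]
        have := ih idx h
        simp [nIdx] at *
        omega
    | true =>
      have := ih idx h
      simp [pairP, nIdx] at *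
      omega

theorem pairP_A1 (s : List String) (er : List Bool) : ∀ idx : Nat,
    (pairP s er idx).1 = sp2 er (s.drop idx) [] := by
  induction er with
  | nil => intro idx; simp [pairP, sp2]
  | cons g gs ih =>
    intro idx
    cases g with
    | false =>
      by_cases hi : idx < s.length
      · have hh : (s.drop idx).headD "-" = s.getD idx "-" := by
          simp [List.head?_drop, List.getD_eq_getElem?_getD]
        simp [pairP, sp2, hi, ih (idx+1), List.tail_drop]
      · have hd : s.drop idx = [] := List.drop_eq_nil_of_le (by omega)
        have hd1 : s.drop (idx+1) = [] := List.drop_eq_nil_of_le (by omega)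
        simp [pairP, sp2, hi, ih idx, hd]
    | true => simp [pairP, sp2, ih idx]

theorem fill_ge (s : List String) (cs : List String) : ∀ j : Nat, s.length ≤ j →
    fillF s cs j = cs := by
  induction cs with
  | nil => intro j h; simp [fillF]
  | cons c cs ih => intro j h; simp [fillF, Nat.not_lt.2 h, ih j h]

theorem fill_A2 (s : List String) (hs : ∀ x ∈ s, x ≠ "-") (er : List Bool) :
    ∀ (idx j : Nat), idx + (nIdx er).length ≤ s.length →
    fillF s (pairP s er idx).1 j = sp2 er (s.drop idx) (s.drop j) := by
  induction er with
  | nil => intro idx j _; simp [pairP, fillF, sp2]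
  | cons g gs ih =>
    intro idx j h
    cases g with
    | true =>
      have h' : idx + (nIdx gs).length ≤ s.length := by simp [nIdx] at h; omega
      rw [show (pairP s (true :: gs) idx).1 = "-" :: (pairP s gs idx).1 by simp [pairP]]
      by_cases hj : j < s.length
      · rw [fillF, if_pos ⟨rfl, hj⟩]
        have hh : (s.drop j).headD "-" = s.getD j "-" := by
          simp [List.head?_drop, List.getD_eq_getElem?_getD]
        simp only [sp2]
        rw [hh, List.tail_drop]
        exact congrArg _ (ih idx (j+1) h')
      · rw [fillF, if_neg (fun hc => hj hc.2)]
        rw [fill_ge s _ j (Nat.not_lt.1 hj)]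
        have hd : s.drop j = [] := List.drop_eq_nil_of_le (Nat.not_lt.1 hj)
        rw [pairP_A1]
        simp [sp2, hd]
    | false =>
      have hlen : (nIdx (false :: gs)).length = (nIdx gs).length + 1 := by simp [nIdx]
      have hi : idx < s.length := by omega
      rw [show (pairP s (false :: gs) idx).1 = s.getD idx "-" :: (pairP s gs (idx+1)).1 by
        simp [pairP, hi]]
      have hne : s.getD idx "-" ≠ "-" := by
        refine hs _ ?_
        rw [List.getD_eq_getElem s "-" hi]
        exact List.getElem_mem hi
      rw [fillF, if_neg (fun hc => hne hc.1)]
      have hh : (s.drop idx).headD "-" = s.getD idx "-" := by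
        simp [List.head?_drop, List.getD_eq_getElem?_getD]
      simp only [sp2]
      rw [hh, List.tail_drop]
      exact congrArg _ (ih (idx+1) j (by omega))

theorem fold_shiftB (s : List String) (L : List Nat) : ∀ (c : String) (cs : List String) (idx : Nat),
    (L.map Nat.succ).foldl (fun (st : List String × Nat) i =>
      if st.1.getD i "" = "-" ∧ st.2 < s.length then (st.1.set i (s.getD st.2 "-"), st.2 + 1)
      else st) (c :: cs, idx)
    = (c :: (L.foldl (fun (st : List String × Nat) i =>
      if st.1.getD i "" = "-" ∧ st.2 < s.length then (st.1.set i (s.getD st.2 "-"), st.2 + 1)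
      else st) (cs, idx)).1,
      (L.foldl (fun (st : List String × Nat) i =>
      if st.1.getD i "" = "-" ∧ st.2 < s.length then (st.1.set i (s.getD st.2 "-"), st.2 + 1)
      else st) (cs, idx)).2) := by
  intro c cs idx
  induction L generalizing c cs idx with
  | nil => simp
  | cons x L ih =>
    rw [List.map_cons, List.foldl_cons, List.foldl_cons]
    simp only [Nat.succ_eq_add_one, List.getD_cons_succ, List.set_cons_succ]
    split_ifs with h
    · rw [ih]
    · rw [ih]

theorem fill_fold (s : List String) (cs : List String) : ∀ idx : Nat,
    ((List.range cs.length).foldl (fun (st : List String × Nat) i =>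
      if st.1.getD i "" = "-" ∧ st.2 < s.length then (st.1.set i (s.getD st.2 "-"), st.2 + 1)
      else st) (cs, idx)).1 = fillF s cs idx := by
  induction cs with
  | nil => intro idx; simp [fillF]
  | cons c cs ih =>
    intro idx
    rw [List.length_cons, List.range_succ_eq_map, List.foldl_cons]
    simp only [List.getD_cons_zero, List.set_cons_zero]
    split_ifs with h
    · rw [fold_shiftB, fillF, if_pos h]
      simp only [ih]
    · rw [fold_shiftB, fillF, if_neg h]
      simp only [ih]

theorem wr_nil (r : List String) : wr r [] = r := rfl

theorem wr_cons (r : List String) (pv : Nat × String) (L : List (Nat × String)) :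
    wr r (pv :: L) = wr (r.set pv.1 pv.2) L := rfl

theorem wr_append (r : List String) (L1 L2 : List (Nat × String)) :
    wr r (L1 ++ L2) = wr (wr r L1) L2 := by simp [wr, List.foldl_append]

theorem wr_shift (L : List (Nat × String)) : ∀ (c : String) (r : List String),
    wr (c :: r) (L.map (fun pv => (pv.1 + 1, pv.2))) = c :: wr r L := by
  induction L with
  | nil => intro c r; simp [wr]
  | cons pv L ih =>
    intro c r
    simp only [wr, List.map_cons, List.foldl_cons, List.set_cons_succ]
    exact ih c (r.set pv.1 pv.2)

theorem zip_split (a : List Nat) : ∀ (b : List Nat) (ys : List String),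
    (a ++ b).zip ys = a.zip ys ++ b.zip (ys.drop a.length) := by
  induction a with
  | nil => intro b ys; simp
  | cons x a ih =>
    intro b ys
    cases ys with
    | nil => simp
    | cons y ys => simp [ih]

theorem zip_shift (l : List Nat) : ∀ (xs : List String),
    (l.map (· + 1)).zip xs = (l.zip xs).map (fun pv => (pv.1 + 1, pv.2)) := by
  induction l with
  | nil => intro xs; simp
  | cons x l ih =>
    intro xs
    cases xs with
    | nil => simp
    | cons y xs => simp [ih]

theorem wr_B1 (er : List Bool) : ∀ (xs ys : List String),
    wr (List.replicate er.length "-") ((nIdx er).zip xs ++ (gIdx er).zip ys) = sp2 er xs ys := by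
  induction er with
  | nil => intro xs ys; simp [nIdx, gIdx, wr, sp2]
  | cons g gs ih =>
    intro xs ys
    cases g with
    | false =>
      rw [show nIdx (false :: gs) = 0 :: (nIdx gs).map (· + 1) by simp [nIdx]]
      rw [show gIdx (false :: gs) = (gIdx gs).map (· + 1) by simp [gIdx]]
      cases xs with
      | nil =>
        rw [List.zip_nil_right, List.nil_append, zip_shift, List.length_cons,
          List.replicate_succ, wr_shift]
        have := ih [] ys
        rw [List.zip_nil_right, List.nil_append] at this
        rw [this]
        simp [sp2]
      | cons a xs =>
        rw [List.zip_cons_cons, zip_shift, zip_shift, List.cons_append, ← List.map_append,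
          List.length_cons, List.replicate_succ, wr_cons]
        simp only [List.set_cons_zero]
        rw [wr_shift, ih]
        simp [sp2]
    | true =>
      rw [show nIdx (true :: gs) = (nIdx gs).map (· + 1) by simp [nIdx]]
      rw [show gIdx (true :: gs) = 0 :: (gIdx gs).map (· + 1) by simp [gIdx]]
      cases ys with
      | nil =>
        rw [List.zip_nil_right, List.append_nil, zip_shift, List.length_cons,
          List.replicate_succ, wr_shift]
        have := ih xs []
        rw [List.zip_nil_right, List.append_nil] at this
        rw [this]
        simp [sp2]
      | cons b ys =>
        rw [List.zip_cons_cons, zip_shift, zip_shift, List.length_cons, List.replicate_succ,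
          wr_append, wr_shift, wr_cons]
        simp only [List.set_cons_zero]
        rw [wr_shift, ← wr_append, ih]
        simp [sp2]

theorem enum_nIdx (er : List Bool) : ∀ s0 : Int,
    ((PySem.List.enumerate er s0).filter (fun p => !p.2)).map Prod.fst
      = (nIdx er).map (fun i : Nat => s0 + (i : Int)) := by
  induction er with
  | nil => intro s0; simp [PySem.List.enumerate_nil, nIdx]
  | cons g gs ih =>
    intro s0
    rw [PySem.List.enumerate_cons]
    cases g with
    | false =>
      rw [List.filter_cons_of_pos (by simp), List.map_cons, ih (s0+1),
        show nIdx (false :: gs) = 0 :: (nIdx gs).map (· + 1) from by simp [nIdx],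
        List.map_cons, List.map_map]
      congr 1
      · simp
      · refine List.map_congr_left ?_
        intro a _
        simp only [Function.comp]
        push_cast
        ring
    | true =>
      rw [List.filter_cons_of_neg (by simp), ih (s0+1),
        show nIdx (true :: gs) = (nIdx gs).map (· + 1) from by simp [nIdx],
        List.map_map]
      refine List.map_congr_left ?_
      intro a _
      simp only [Function.comp]
      push_cast
      ring

theorem enum_gIdx (er : List Bool) : ∀ s0 : Int,
    ((PySem.List.enumerate er s0).filter (fun p => p.2)).map Prod.fst
      = (gIdx er).map (fun i : Nat => s0 + (i : Int)) := by
  induction er with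
  | nil => intro s0; simp [PySem.List.enumerate_nil, gIdx]
  | cons g gs ih =>
    intro s0
    rw [PySem.List.enumerate_cons]
    cases g with
    | true =>
      rw [List.filter_cons_of_pos (by simp), List.map_cons, ih (s0+1),
        show gIdx (true :: gs) = 0 :: (gIdx gs).map (· + 1) from by simp [gIdx],
        List.map_cons, List.map_map]
      congr 1
      · simp
      · refine List.map_congr_left ?_
        intro a _
        simp only [Function.comp]
        push_cast
        ring
    | false =>
      rw [List.filter_cons_of_neg (by simp), ih (s0+1),
        show gIdx (false :: gs) = (gIdx gs).map (· + 1) from by simp [gIdx],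
        List.map_map]
      refine List.map_congr_left ?_
      intro a _
      simp only [Function.comp]
      push_cast
      ring

theorem B_fold (onat : List Nat) (s : List String) : ∀ (K : Nat), K ≤ min s.length onat.length → ∀ r : List String,
    (List.range K).foldl
      (fun r k => r.set (((onat.map (fun i : Nat => (i : Int))).getD k 0).toNat) (s.getD k "-")) r
    = wr r ((onat.zip s).take K) := by
  intro K
  induction K with
  | zero => intro h r; simp [wr]
  | succ K ih =>
    intro h r
    have hK1 : K < onat.length := by omega
    have hK2 : K < s.length := by omega
    have hz : K < (onat.zip s).length := by simp [List.length_zip]; omega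
    rw [List.range_succ, List.foldl_append, ih (by omega), List.take_add_one,
      List.getElem?_eq_getElem hz]
    simp only [List.foldl_cons, List.foldl_nil, Option.toList_some]
    rw [wr_append, wr_cons, wr_nil, List.getElem_zip]
    rw [List.getD_eq_getElem _ _ (by simpa using hK1), List.getElem_map,
      List.getD_eq_getElem _ _ hK2]
    simp

theorem A_eq_sp2 (scg : List String) (er : List Bool) :
    reproyectar_gaps_por_estructura scg er
      = sp2 er (scg.filter (fun a => a ≠ "-"))
          ((scg.filter (fun a => a ≠ "-")).drop (nIdx er).length) := by
  have hs : ∀ x ∈ scg.filter (fun a => a ≠ "-"), x ≠ "-" := by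
    intro x hx
    simpa using (List.mem_filter.1 hx).2
  simp only [reproyectar_gaps_por_estructura]
  rw [pairP_fold]
  have hsnd := pairP_snd (scg.filter (fun a => a ≠ "-")) er 0 (Nat.zero_le _)
  by_cases h : (nIdx er).length < (scg.filter (fun a => a ≠ "-")).length
  · rw [if_pos (by simp only [hsnd]; omega)]
    rw [fill_fold]
    simp only [List.nil_append, hsnd]
    rw [show min (0 + (nIdx er).length) (scg.filter (fun a => a ≠ "-")).length = (nIdx er).length by omega]
    rw [fill_A2 _ hs er 0 (nIdx er).length (by omega), List.drop_zero]
  · rw [if_neg (by simp only [hsnd]; omega)]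
    simp only [List.nil_append]
    rw [pairP_A1, List.drop_zero,
      List.drop_eq_nil_of_le (by omega : (scg.filter (fun a => a ≠ "-")).length ≤ (nIdx er).length)]

theorem B_eq_sp2 (scg : List String) (er : List Bool) :
    reproyectar_gaps_por_estructura_alt scg er
      = sp2 er (scg.filter (fun a => a ≠ "-"))
          ((scg.filter (fun a => a ≠ "-")).drop (nIdx er).length) := by
  simp only [reproyectar_gaps_por_estructura_alt]
  rw [enum_nIdx er 0, enum_gIdx er 0]
  have hz : ∀ l : List Nat, l.map (fun i : Nat => (0 : Int) + (i : Int)) = l.map (fun i : Nat => (i : Int)) := by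
    intro l
    refine List.map_congr_left ?_
    intro a _
    ring
  rw [hz, hz, ← List.map_append]
  rw [B_fold (nIdx er ++ gIdx er) (scg.filter (fun a => a ≠ "-"))
    (min (scg.filter (fun a => a ≠ "-")).length ((nIdx er ++ gIdx er).map (fun i : Nat => (i : Int))).length)
    (by simp) _]
  rw [List.take_of_length_le (by simp [List.length_zip])]
  rw [zip_split, wr_B1]

-- ===== VERDICT (by name: the statement is the Claim_ definition above) =====
theorem reproyectar_gaps_por_estructura_spec : Claim_equal_reproyectar_gaps_por_estructura := by
  intro scg er _
  unfold Spec_reproyectar_gaps_por_estructura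
  rw [A_eq_sp2, B_eq_sp2]
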